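-- pv_equiv track=rewrite | github.com/YounSangWoo/SWJG_weekly | Week02/binary_search/num_18/num_18_2504_submit.py | parenthesis_value
-- ===== SOURCE A (Python) =====
-- def par_close(stack, sum_stack, p):
--     tmp_sum = 0
--     if not stack:
--         return -1
--     if stack[-1] != p:
--         return -1
--     if len(sum_stack) == 0:
--         if len(stack) == 1:
--             tmp_sum += p
--         else :
--             sum_stack.append([p, len(stack) - 1])
--     else :
--         if len(stack) == 1:
--             while sum_stack:
--                 tmp_sum += sum_stack.pop()[0]
--             tmp_sum *= p
--         else :
--             if sum_stack and sum_stack[-1][1] > len(stack) - 1: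
--                 while sum_stack and sum_stack[-1][1] > len(stack) - 1:
--                     tmp_sum += sum_stack.pop()[0]
--                 sum_stack.append([p * tmp_sum, len(stack) - 1])
--                 tmp_sum = 0
--             else :
--                 sum_stack.append([p, len(stack) - 1])
--     stack.pop()
--     return tmp_sum
--
-- def parenthesis_value(p_str):
--     stack = []
--     sum_stack = []
--     status = 0
--     sum = 0
--     for p in p_str:
--         if p == "(" or p == "[":
--             if p == "(":
--                 stack.append(2)
--             else:
--                 stack.append(3)
--         else :
--             if p == ")":
--                 tmp = par_close(stack, sum_stack, 2)
--             else:
--                 tmp = par_close(stack, sum_stack, 3)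
--             if tmp == -1:
--                 return 0
--             else :
--                 sum += tmp
--     if len(stack) != 0:
--         return 0
--     return sum
-- ===== SOURCE B (Python) =====
-- def parenthesis_value(p_str):
--     ans = 0
--     tmp = 1
--     stack = []
--     prev = None
--     for c in p_str:
--         if c == '(' or c == '[':
--             w = 2 if c == '(' else 3
--             stack.append(w)
--             tmp *= w
--         else:
--             w = 2 if c == ')' else 3
--             if not stack or stack[-1] != w:
--                 return 0
--             if (w == 2 and prev == '(') or (w == 3 and prev == '['):
--                 ans += tmp
--             stack.pop()
--             tmp //= w
--         prev = c
--     return 0 if stack else ans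
-- ===== Notes on version B (the rewrite author's own statement) =====
-- stated objective: simpler
-- what changed: Replaces A's deferred sum_stack of [value,depth] pairs with merge-on-close passes by a single running multiplier tmp (product of open weights) that adds tmp to the answer exactly when an empty pair closes, detected via the previous character.
import Mathlib
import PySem

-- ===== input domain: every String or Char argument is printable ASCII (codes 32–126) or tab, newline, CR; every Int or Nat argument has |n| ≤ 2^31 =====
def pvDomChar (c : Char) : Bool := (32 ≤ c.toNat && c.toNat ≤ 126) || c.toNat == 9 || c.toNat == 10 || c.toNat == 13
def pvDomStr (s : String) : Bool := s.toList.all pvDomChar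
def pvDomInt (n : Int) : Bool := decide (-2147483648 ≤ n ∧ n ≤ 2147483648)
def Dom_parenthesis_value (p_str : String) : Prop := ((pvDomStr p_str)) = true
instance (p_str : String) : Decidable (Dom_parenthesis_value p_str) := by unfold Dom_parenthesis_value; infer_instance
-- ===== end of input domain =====

-- B replaces A's deferred sum_stack of [value,depth] pairs by a single running
-- multiplier added on each empty pair (objective: simpler).

-- ===== PORT A =====
-- `while sum_stack: tmp_sum += sum_stack.pop()[0]`
def pvSumAll : List (Int × Int) → Int
  | [] => 0
  | e :: r => e.1 + pvSumAll r

-- `while sum_stack and sum_stack[-1][1] > d: tmp_sum += sum_stack.pop()[0]`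
-- (returns the accumulated tmp_sum and the remaining sum_stack; head = Python list end)
def pvPopWhile (d : Int) : List (Int × Int) → Int × List (Int × Int)
  | [] => (0, [])
  | e :: r =>
    if e.2 > d then
      let pr := pvPopWhile d r
      (e.1 + pr.1, pr.2)
    else (0, e :: r)

-- par_close, returning (tmp_sum-or-(-1), new stack, new sum_stack); stacks have head = top
def par_close (stack : List Int) (sum_stack : List (Int × Int)) (p : Int) :
    Int × List Int × List (Int × Int) :=
  match stack with
  | [] => (-1, stack, sum_stack)
  | t :: rest =>
    if t ≠ p then (-1, stack, sum_stack)
    else if sum_stack = [] then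
      if stack.length = 1 then (p, rest, sum_stack)
      else (0, rest, (p, (stack.length : Int) - 1) :: sum_stack)
    else if stack.length = 1 then
      (pvSumAll sum_stack * p, rest, [])
    else
      match sum_stack with
      | [] => (0, rest, (p, (stack.length : Int) - 1) :: sum_stack) -- unreachable (sum_stack ≠ [])
      | e :: _ =>
        if e.2 > (stack.length : Int) - 1 then
          let pr := pvPopWhile ((stack.length : Int) - 1) sum_stack
          (0, rest, (p * pr.1, (stack.length : Int) - 1) :: pr.2)
        else (0, rest, (p, (stack.length : Int) - 1) :: sum_stack)

def pvALoop : List Char → List Int → List (Int × Int) → Int → Int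
  | [], stack, _, s => if stack.length ≠ 0 then 0 else s
  | c :: cs, stack, ss, s =>
    if c = '(' ∨ c = '[' then
      pvALoop cs ((if c = '(' then 2 else 3) :: stack) ss s
    else
      let r := if c = ')' then par_close stack ss 2 else par_close stack ss 3
      if r.1 = -1 then 0 else pvALoop cs r.2.1 r.2.2 (s + r.1)

def parenthesis_value (p_str : String) : Int := pvALoop p_str.toList [] [] 0

-- ===== PORT B =====
def pvBLoop : List Char → List Int → Int → Int → Option Char → Int
  | [], stack, _, ans, _ => if stack ≠ [] then 0 else ans
  | c :: cs, stack, tmp, ans, prev =>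
    if c = '(' ∨ c = '[' then
      let w : Int := if c = '(' then 2 else 3
      pvBLoop cs (w :: stack) (tmp * w) ans (some c)
    else
      let w : Int := if c = ')' then 2 else 3
      match stack with
      | [] => 0
      | t :: rest =>
        if t ≠ w then 0
        else
          let ans' := if (w = 2 ∧ prev = some '(') ∨ (w = 3 ∧ prev = some '[') then ans + tmp else ans
          pvBLoop cs rest (PySem.Int.floordiv tmp w) ans' (some c)

def parenthesis_value_alt (p_str : String) : Int := pvBLoop p_str.toList [] 1 0 none

-- ===== PRECONDITION & SPEC =====
def Spec_parenthesis_value (p_str : String) (out : Int) : Prop := out = parenthesis_value_alt p_str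
instance (p_str : String) (out : Int) : Decidable (Spec_parenthesis_value p_str out) := by unfold Spec_parenthesis_value; infer_instance

-- ===== CLAIM (what is proved, stated in full; the proofs are below) =====
def Claim_equal_parenthesis_value : Prop := ∀ (p_str : String), Dom_parenthesis_value p_str → Spec_parenthesis_value p_str (parenthesis_value p_str)

-- ===== LEMMAS AND PROOFS =====

-- product of the bottom d elements of the stack (head = top)
def pvProdBot (d : Nat) (stack : List Int) : Int := (stack.reverse.take d).prod

def pvContrib (stack : List Int) (e : Int × Int) : Int := e.1 * pvProdBot e.2.toNat stack

def pvSumContrib (ss : List (Int × Int)) (stack : List Int) : Int :=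
  (ss.map (pvContrib stack)).sum

-- the invariant tying A's loop state (stack, ss, s) to B's (tmp, ans, prev)
def pvInv (stack : List Int) (ss : List (Int × Int)) (s ans tmp : Int) (prev : Option Char) : Prop :=
  tmp = stack.prod ∧
  ans = s + pvSumContrib ss stack ∧
  (∀ e ∈ ss, 1 ≤ e.2 ∧ e.2 ≤ (stack.length : Int)) ∧
  ss.Pairwise (fun a b => b.2 ≤ a.2) ∧
  (∀ e ∈ ss, 0 ≤ e.1) ∧
  ((∃ c w, prev = some c ∧ ((c = '(' ∧ w = (2:Int)) ∨ (c = '[' ∧ w = 3)) ∧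
      stack.head? = some w ∧ ∀ e ∈ ss, e.2 ≤ (stack.length : Int) - 1) ∨
   ((∀ c, prev = some c → c ≠ '(' ∧ c ≠ '[') ∧
      (stack = [] ∨ ss.head?.map Prod.snd = some (stack.length : Int))))

lemma pvProdBot_cons (d : Nat) (t : Int) (rest : List Int) (h : d ≤ rest.length) :
    pvProdBot d (t :: rest) = pvProdBot d rest := by
  simp [pvProdBot, List.take_append, Nat.sub_eq_zero_of_le, h]

lemma pvProdBot_full (stack : List Int) : pvProdBot stack.length stack = stack.prod := by
  simp [pvProdBot, List.take_of_length_le]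

lemma pvSumContrib_cons (ss : List (Int × Int)) (t : Int) (rest : List Int)
    (h : ∀ e ∈ ss, e.2 ≤ (rest.length : Int)) :
    pvSumContrib ss (t :: rest) = pvSumContrib ss rest := by
  induction ss with
  | nil => rfl
  | cons e r ih =>
    have he : e.2.toNat ≤ rest.length := by have := h e (by simp); omega
    simp only [pvSumContrib, List.map_cons, List.sum_cons]
    have h1 : pvContrib (t :: rest) e = pvContrib rest e := by
      simp [pvContrib, pvProdBot_cons _ _ _ he]
    have h2 := ih (fun e' h' => h e' (by simp [h']))
    simp only [pvSumContrib] at h2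
    rw [h1, h2]

lemma pvSumAll_nonneg (ss : List (Int × Int)) (h : ∀ e ∈ ss, 0 ≤ e.1) : 0 ≤ pvSumAll ss := by
  induction ss with
  | nil => simp [pvSumAll]
  | cons e r ih =>
    have := h e (by simp)
    have := ih (fun e' h' => h e' (by simp [h']))
    simp only [pvSumAll]; omega

-- characterisation of the depth-1 case: all depths = 1, stack = [w]
lemma pvSumContrib_depth1 (ss : List (Int × Int)) (w : Int)
    (h : ∀ e ∈ ss, e.2 = 1) : pvSumContrib ss [w] = pvSumAll ss * w := by
  induction ss with
  | nil => simp [pvSumContrib, pvSumAll]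
  | cons e r ih =>
    have he : e.2 = 1 := h e (by simp)
    simp only [pvSumContrib, List.map_cons, List.sum_cons, pvSumAll]
    have h2 := ih (fun e' h' => h e' (by simp [h']))
    simp only [pvSumContrib] at h2
    rw [h2]
    have h1 : pvContrib [w] e = e.1 * w := by simp [pvContrib, he, pvProdBot]
    rw [h1]; ring

-- popWhile d: with sorted depths bounded by d+1, it removes exactly the depth-(d+1) prefix
lemma pvPopWhile_spec (d : Int) (ss : List (Int × Int))
    (hs : ss.Pairwise (fun a b => b.2 ≤ a.2))
    (hub : ∀ e ∈ ss, e.2 ≤ d + 1)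
    (hv : ∀ e ∈ ss, 0 ≤ e.1) (C : Int → Int) :
    (∀ e ∈ (pvPopWhile d ss).2, e.2 ≤ d) ∧
    (∀ e ∈ (pvPopWhile d ss).2, e ∈ ss) ∧
    (pvPopWhile d ss).2.Pairwise (fun a b => b.2 ≤ a.2) ∧
    0 ≤ (pvPopWhile d ss).1 ∧
    (ss.map (fun e => e.1 * C e.2)).sum
      = (pvPopWhile d ss).1 * C (d + 1) + ((pvPopWhile d ss).2.map (fun e => e.1 * C e.2)).sum := by
  induction ss with
  | nil => simp [pvPopWhile]
  | cons e r ih =>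
    rcases List.pairwise_cons.mp hs with ⟨hhead, htail⟩
    by_cases hgt : e.2 > d
    · have he2 : e.2 = d + 1 := by have := hub e (by simp); omega
      obtain ⟨h1, h2, h3, h0, h4⟩ := ih htail (fun e' he' => hub e' (by simp [he']))
        (fun e' he' => hv e' (by simp [he']))
      have hve : 0 ≤ e.1 := hv e (by simp)
      refine ⟨?_, ?_, ?_, ?_, ?_⟩
      · simpa [pvPopWhile, hgt] using h1
      · intro e' he'; simp only [pvPopWhile, if_pos hgt] at he'
        exact List.mem_cons_of_mem _ (h2 e' he')
      · simpa [pvPopWhile, hgt] using h3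
      · simp only [pvPopWhile, if_pos hgt]; omega
      · simp only [pvPopWhile, if_pos hgt, List.map_cons, List.sum_cons]
        rw [h4, he2]; ring
    · simp only [pvPopWhile, if_neg hgt]
      refine ⟨?_, ?_, hs, le_refl 0, by ring⟩
      · intro e' he'
        rcases List.mem_cons.mp he' with h | h
        · subst h; omega
        · have := hhead e' h; omega
      · intro e' he'; exact he'

lemma pvFloordiv_cancel (w x : Int) (hw : w ≠ 0) : PySem.Int.floordiv (w * x) w = x := by
  simp [PySem.Int.floordiv]
  rw [mul_comm, Int.mul_fdiv_cancel _ hw]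


lemma pvMain (cs : List Char) : ∀ stack ss s ans tmp prev,
    pvInv stack ss s ans tmp prev →
    pvALoop cs stack ss s = pvBLoop cs stack tmp ans prev := by
  induction cs with
  | nil =>
    intro stack ss s ans tmp prev hinv
    obtain ⟨h1, h2, h3, h4, h6, h5⟩ := hinv
    cases stack with
    | nil =>
      have hss : ss = [] := by
        cases ss with
        | nil => rfl
        | cons e r => have := h3 e (by simp); simp at this; omega
      simp [pvALoop, pvBLoop, h2, hss, pvSumContrib]
    | cons t rest => simp [pvALoop, pvBLoop]
  | cons c cs ih =>
    intro stack ss s ans tmp prev hinv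
    obtain ⟨h1, h2, h3, h4, h6, h5⟩ := hinv
    by_cases hop : c = '(' ∨ c = '['
    · -- opener: push weight w, tmp *= w
      set w : Int := if c = '(' then 2 else 3 with hw
      have hbound : ∀ e ∈ ss, e.2 ≤ (stack.length : Int) := fun e he => (h3 e he).2
      have hsc : pvSumContrib ss (w :: stack) = pvSumContrib ss stack :=
        pvSumContrib_cons ss w stack hbound
      simp only [pvALoop, pvBLoop, if_pos hop]
      refine ih (w :: stack) ss s ans (tmp * w) (some c) ?_
      refine ⟨by simp [h1, mul_comm], by simp [hsc, h2], ?_, h4, h6, ?_⟩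
      · intro e he; have := h3 e he; simp; omega
      · left
        refine ⟨c, w, rfl, ?_, by simp, ?_⟩
        · rcases hop with h | h <;> simp [hw, h]
        · intro e he; have := hbound e he; simp; omega
    · -- closer with weight w
      have hcp : ¬ (c = '(') := fun h => hop (Or.inl h)
      have hcb : ¬ (c = '[') := fun h => hop (Or.inr h)
      set w : Int := if c = ')' then 2 else 3 with hw
      have hAstep : pvALoop (c :: cs) stack ss s =
          (if (par_close stack ss w).1 = -1 then 0
           else pvALoop cs (par_close stack ss w).2.1 (par_close stack ss w).2.2 (s + (par_close stack ss w).1)) := by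
        by_cases hc : c = ')' <;> simp [pvALoop, hop, hw, hc]
      cases stack with
      | nil =>
        rw [hAstep]
        have hpc : par_close [] ss w = (-1, [], ss) := by simp [par_close]
        rw [hpc]
        by_cases hc : c = ')' <;> simp [pvBLoop, hop, hc]
      | cons t rest =>
        by_cases htw : t = w
        · -- matched close
          have hBstep : pvBLoop (c :: cs) (t :: rest) tmp ans prev =
              pvBLoop cs rest (PySem.Int.floordiv tmp w)
                (if (w = 2 ∧ prev = some '(') ∨ (w = 3 ∧ prev = some '[') then ans + tmp else ans) (some c) := by
            simp [pvBLoop, hop, htw, hw]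
          have hw23 : w = 2 ∨ w = 3 := by by_cases hc : c = ')' <;> simp [hw, hc]
          have hwne : w ≠ 0 := by rcases hw23 with h | h <;> simp [h]
          have htmp' : PySem.Int.floordiv tmp w = rest.prod := by
            rw [h1, htw]; simp only [List.prod_cons]; exact pvFloordiv_cancel w rest.prod hwne
          rw [hAstep, hBstep]
          rcases h5 with ⟨c₀, w₀, hprev, hcw, hhead, hdep⟩ | ⟨hnop, hside⟩
          · -- P1: prev is the matching opener; this pair is empty; A pushes / adds p
            have hw0 : w₀ = t := by simp at hhead; omega
            have haddc : ((w = 2 ∧ prev = some '(') ∨ (w = 3 ∧ prev = some '[')) := by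
              rcases hcw with ⟨hc0, hw0'⟩ | ⟨hc0, hw0'⟩
              · left; exact ⟨by omega, by rw [hprev, hc0]⟩
              · right; exact ⟨by omega, by rw [hprev, hc0]⟩
            have hdep' : ∀ e ∈ ss, e.2 ≤ (rest.length : Int) := by
              intro e he; have := hdep e he; simp at this ⊢; omega
            rw [if_pos haddc]
            cases ss with
            | nil =>
              cases rest with
              | nil =>
                -- empty sum_stack, depth 1: A adds p directly
                have hpc : par_close [t] [] w = (w, [], []) := by
                  simp [par_close, htw]
                rw [hpc]
                have hne : ¬ (w = -1) := by rcases hw23 with h | h <;> simp [h]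
                rw [if_neg (by simpa using hne)]
                refine ih [] [] (s + w) (ans + tmp) (PySem.Int.floordiv tmp w) (some c) ?_
                refine ⟨htmp', ?_, ?_, ?_, ?_, Or.inr ⟨?_, Or.inl rfl⟩⟩
                · rw [h2, h1, ← htw]; simp [pvSumContrib]
                · simp
                · simp
                · simp
                · intro c' hc'; cases hc'; exact ⟨hcp, hcb⟩
              | cons r0 rs =>
                -- empty sum_stack, depth > 1: A pushes [p, L-1]
                have hlen : (t :: r0 :: rs).length ≠ 1 := by simp
                have hpc : par_close (t :: r0 :: rs) [] w
                    = (0, r0 :: rs, [(w, ((t :: r0 :: rs).length : Int) - 1)]) := by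
                  simp [par_close, htw]
                rw [hpc]
                rw [if_neg (by norm_num)]
                have hd : ((t :: r0 :: rs).length : Int) - 1 = ((r0 :: rs).length : Int) := by simp
                refine ih (r0 :: rs) _ (s + 0) (ans + tmp) (PySem.Int.floordiv tmp w) (some c) ?_
                refine ⟨htmp', ?_, ?_, ?_, ?_, Or.inr ⟨?_, Or.inr ?_⟩⟩
                · rw [h2, h1, ← htw]
                  simp only [pvSumContrib, List.map_nil, List.sum_nil, List.map_cons,
                    List.sum_cons, pvContrib]
                  have hn : (((t :: r0 :: rs).length : Int) - 1).toNat = (r0 :: rs).length := by simp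
                  rw [hn, pvProdBot_full]
                  simp
                · intro e he; simp only [List.mem_singleton] at he
                  subst he; simp
                · simp
                · intro e he; simp only [List.mem_singleton] at he; subst he
                  rcases hw23 with h | h <;> simp [h]
                · intro c' hc'; cases hc'; exact ⟨hcp, hcb⟩
                · simp
            | cons e0 es =>
              -- prev opener ∧ ss nonempty: depths ≤ L-1 force L ≥ 2; push branch
              have he0 := hdep e0 (by simp)
              have he0' := h3 e0 (by simp)
              have hrest : rest.length ≠ 0 := by simp at he0; omega
              have hlen : (t :: rest).length ≠ 1 := by simp [hrest]
              have hngt : ¬ (e0.2 > ((t :: rest).length : Int) - 1) := by simp at he0 ⊢; omega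
              have hrne : rest ≠ [] := by intro h; apply hrest; simp [h]
              have hnlt : ¬ ((rest.length : Int) < e0.2) := by
                have hc : ((t :: rest).length : Int) = (rest.length : Int) + 1 := by simp
                omega
              have hpc : par_close (t :: rest) (e0 :: es) w
                  = (0, rest, (w, ((t :: rest).length : Int) - 1) :: e0 :: es) := by
                simp [par_close, htw, hrne, hnlt]
              rw [hpc]
              rw [if_neg (by norm_num)]
              have hd : ((t :: rest).length : Int) - 1 = (rest.length : Int) := by simp
              refine ih rest _ (s + 0) (ans + tmp) (PySem.Int.floordiv tmp w) (some c) ?_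
              refine ⟨htmp', ?_, ?_, ?_, ?_, Or.inr ⟨?_, Or.inr ?_⟩⟩
              · rw [h2, h1, ← htw]
                simp only [pvSumContrib, List.map_cons, List.sum_cons, pvContrib]
                have hn : (((t :: rest).length : Int) - 1).toNat = rest.length := by simp
                rw [hn, pvProdBot_full]
                have hrw := pvSumContrib_cons (e0 :: es) t rest hdep'
                simp only [pvSumContrib, List.map_cons, List.sum_cons, pvContrib] at hrw
                rw [hrw]
                simp only [List.prod_cons]
                ring
              · intro e he
                simp only [List.mem_cons, hd] at he
                rcases he with he | he
                · subst he; simp; omega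
                · exact ⟨(h3 e (by simp [he])).1, hdep' e (by simp [he])⟩
              · rw [List.pairwise_cons]
                constructor
                · intro e he; have := hdep' e he; simp; omega
                · exact h4
              · intro e he
                rcases List.mem_cons.mp he with he | he
                · subst he; rcases hw23 with h | h <;> simp [h]
                · exact h6 e he
              · intro c' hc'; cases hc'; exact ⟨hcp, hcb⟩
              · simp
          · -- P2: prev not an opener; ss head depth = L (nonempty content)
            have hnadd : ¬ ((w = 2 ∧ prev = some '(') ∨ (w = 3 ∧ prev = some '[')) := by
              rintro (⟨-, hp⟩ | ⟨-, hp⟩) <;>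
                { rcases hnop _ hp with ⟨hA, hB⟩; simp at hA hB }
            rw [if_neg hnadd]
            rcases hside with hnil | hhd
            · exact absurd hnil (by simp)
            cases ss with
            | nil => simp at hhd
            | cons e0 es =>
              simp at hhd
              cases rest with
              | nil =>
                -- depth 1 with content: A sums everything * p into s
                have hall1 : ∀ e ∈ e0 :: es, e.2 = 1 := by
                  intro e he
                  have hb := h3 e he
                  simp at hb; omega
                have hpc : par_close [t] (e0 :: es) w = (pvSumAll (e0 :: es) * w, [], []) := by
                  simp [par_close, htw]
                rw [hpc]
                have hnn : 0 ≤ pvSumAll (e0 :: es) := pvSumAll_nonneg _ h6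
                have hne : ¬ (pvSumAll (e0 :: es) * w = -1) := by
                  rcases hw23 with h | h <;> rw [h] <;> omega
                rw [if_neg (by simpa using hne)]
                refine ih [] [] (s + pvSumAll (e0 :: es) * w) ans (PySem.Int.floordiv tmp w) (some c) ?_
                refine ⟨htmp', ?_, by simp, by simp, by simp, Or.inr ⟨?_, Or.inl rfl⟩⟩
                · rw [h2]
                  have hsc : pvSumContrib (e0 :: es) [t] = pvSumAll (e0 :: es) * w := by
                    rw [htw]; exact pvSumContrib_depth1 _ w hall1
                  rw [hsc]; simp [pvSumContrib]
                · intro c' hc'; cases hc'; exact ⟨hcp, hcb⟩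
              | cons r0 rs =>
                -- depth > 1: merge the depth-L prefix into one entry at depth L-1
                have hlen : (t :: r0 :: rs).length ≠ 1 := by simp
                have hgt : e0.2 > ((t :: r0 :: rs).length : Int) - 1 := by simp [hhd]
                have hub : ∀ e ∈ e0 :: es, e.2 ≤ (((t :: r0 :: rs).length : Int) - 1) + 1 := by
                  intro e he; have := (h3 e he).2; omega
                obtain ⟨hp1, hp2, hp3, hp0, hp4⟩ :=
                  pvPopWhile_spec (((t :: r0 :: rs).length : Int) - 1) (e0 :: es) h4 hub h6
                    (fun d => pvContrib (t :: r0 :: rs) (1, d))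
                have hpc : par_close (t :: r0 :: rs) (e0 :: es) w
                    = (0, r0 :: rs,
                       (w * (pvPopWhile (((t :: r0 :: rs).length : Int) - 1) (e0 :: es)).1,
                        ((t :: r0 :: rs).length : Int) - 1)
                        :: (pvPopWhile (((t :: r0 :: rs).length : Int) - 1) (e0 :: es)).2) := by
                  have hlt : ((rs.length : Int) + 1) < e0.2 := by
                    simp only [List.length_cons] at hhd; push_cast at hhd ⊢; omega
                  simp [par_close, htw, hlt]
                rw [hpc]
                rw [if_neg (by norm_num)]
                set S₁ := (pvPopWhile (((t :: r0 :: rs).length : Int) - 1) (e0 :: es)).1 with hS₁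
                set ss₃ := (pvPopWhile (((t :: r0 :: rs).length : Int) - 1) (e0 :: es)).2 with hss₃
                have hd : ((t :: r0 :: rs).length : Int) - 1 = ((r0 :: rs).length : Int) := by simp
                have hss₃b : ∀ e ∈ ss₃, e.2 ≤ ((r0 :: rs).length : Int) := by
                  intro e he; have := hp1 e he; omega
                have hss₃lb : ∀ e ∈ ss₃, 1 ≤ e.2 := fun e he => (h3 e (hp2 e he)).1
                refine ih (r0 :: rs) _ (s + 0) ans (PySem.Int.floordiv tmp w) (some c) ?_
                refine ⟨htmp', ?_, ?_, ?_, ?_, Or.inr ⟨?_, Or.inr ?_⟩⟩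
                · rw [h2]
                  have hmap : ∀ (l : List (Int × Int)),
                      (l.map (pvContrib (t :: r0 :: rs))).sum
                        = (l.map (fun e => e.1 * pvContrib (t :: r0 :: rs) (1, e.2))).sum := by
                    intro l; congr 1; apply List.map_congr_left
                    intro e he; simp [pvContrib]
                  have hgoal : (List.map (pvContrib (t :: r0 :: rs)) (e0 :: es)).sum
                      = S₁ * pvContrib (t :: r0 :: rs) (1, (((t :: r0 :: rs).length : Int) - 1) + 1)
                        + (ss₃.map (pvContrib (t :: r0 :: rs))).sum := by
                    rw [hmap (e0 :: es), hmap ss₃]; exact hp4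
                  simp only [pvSumContrib]
                  rw [hgoal]
                  simp only [List.map_cons, List.sum_cons]
                  have hC1 : pvContrib (t :: r0 :: rs) (1, ((t :: r0 :: rs).length : Int) - 1 + 1)
                      = (t :: r0 :: rs).prod := by
                    have hLfull : (((t :: r0 :: rs).length : Int) - 1 + 1) = (((t :: r0 :: rs).length : Int)) := by ring
                    simp only [pvContrib, hLfull]
                    have hn : ((((t :: r0 :: rs).length : Int))).toNat = (t :: r0 :: rs).length := by omega
                    rw [hn, pvProdBot_full]; ring
                  have hC2 : pvContrib (r0 :: rs) (w * S₁, ((t :: r0 :: rs).length : Int) - 1)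
                      = w * S₁ * (r0 :: rs).prod := by
                    simp only [pvContrib, hd]
                    have hn : (((r0 :: rs).length : Int)).toNat = (r0 :: rs).length := by simp
                    rw [hn, pvProdBot_full]
                  rw [hC1, hC2]
                  have hrest3 : (ss₃.map (pvContrib (r0 :: rs))).sum = (ss₃.map (pvContrib (t :: r0 :: rs))).sum := by
                    have := pvSumContrib_cons ss₃ t (r0 :: rs) hss₃b
                    simpa [pvSumContrib] using this.symm
                  rw [hrest3]
                  have hprod : (t :: r0 :: rs).prod = w * (r0 :: rs).prod := by simp [htw]
                  rw [hprod]; ring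
                · intro e he
                  rcases List.mem_cons.mp he with he | he
                  · subst he; simp
                  · exact ⟨hss₃lb e he, hss₃b e he⟩
                · rw [List.pairwise_cons]
                  refine ⟨fun e he => ?_, hp3⟩
                  have hb := hss₃b e he
                  have hc : ((t :: r0 :: rs).length : Int) = ((r0 :: rs).length : Int) + 1 := by simp
                  show e.2 ≤ ((t :: r0 :: rs).length : Int) - 1
                  omega
                · intro e he
                  rcases List.mem_cons.mp he with he | he
                  · subst he
                    exact mul_nonneg (by rcases hw23 with h | h <;> simp [h]) hp0
                  · exact h6 e (hp2 e he)
                · intro c' hc'; cases hc'; exact ⟨hcp, hcb⟩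
                · simp
        · -- mismatched close: both return 0
          have hpc : par_close (t :: rest) ss w = (-1, t :: rest, ss) := by
            simp [par_close, htw]
          rw [hAstep, hpc]
          have hc2 : ¬ (t = w) := htw
          by_cases hc : c = ')' <;> simp [pvBLoop, hop, hw, hc] at hc2 ⊢ <;> simp [hc2]

-- ===== VERDICT (by name: the statement is the Claim_ definition above) =====
theorem parenthesis_value_spec : Claim_equal_parenthesis_value := by
  intro p_str _
  unfold Spec_parenthesis_value parenthesis_value parenthesis_value_alt
  exact pvMain p_str.toList [] [] 0 0 1 none
    ⟨by simp, by simp [pvSumContrib], by simp, by simp, by simp,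
     Or.inr ⟨by simp, Or.inl rfl⟩⟩
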